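-- pv_equiv track=rewrite | github.com/ZeerakA/CS303E | codingbat.py | countClumps
-- ===== SOURCE A (Python) =====
-- def countClumps(a):
-- 	clumpsize = 1
-- 	clumpcount = 0
-- 	for i in range(len(a) - 1):
-- 		if a[i] == a[i+1]:
-- 			clumpsize += 1
-- 		if a[i] != a[i+1] and clumpsize > 1:
-- 			clumpcount += 1
-- 			clumpsize = 1
-- 	if clumpsize > 1:
-- 		clumpcount +=1
-- 	return clumpcount
-- ===== SOURCE B (Python) =====
-- def countClumps(a):
--     count = 0
--     i = 0
--     n = len(a)
--     while i < n:
--         j = i + 1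
--         while j < n and a[j] == a[i]:
--             j += 1
--         if j - i > 1:
--             count += 1
--         i = j
--     return count
-- ===== Notes on version B (the rewrite author's own statement) =====
-- stated objective: alternative
-- what changed: B scans the list run by run (find the extent of each maximal run of equal elements, count runs of length > 1, jump to the run's end) instead of A's single pairwise pass with a running clumpsize counter and a post-loop fixup.
import Mathlib
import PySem

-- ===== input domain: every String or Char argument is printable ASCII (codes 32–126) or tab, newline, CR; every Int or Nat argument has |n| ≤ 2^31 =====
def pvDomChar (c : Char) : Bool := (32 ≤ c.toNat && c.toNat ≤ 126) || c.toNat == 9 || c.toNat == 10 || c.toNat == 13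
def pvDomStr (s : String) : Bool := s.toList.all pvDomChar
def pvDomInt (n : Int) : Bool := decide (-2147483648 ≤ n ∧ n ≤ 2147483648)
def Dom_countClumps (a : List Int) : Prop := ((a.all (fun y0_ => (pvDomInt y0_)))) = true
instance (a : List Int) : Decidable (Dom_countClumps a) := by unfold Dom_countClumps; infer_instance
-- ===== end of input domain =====

-- B counts clumps by scanning maximal runs (takeWhile/dropWhile jumps) instead of A's pairwise pass with a clumpsize counter; objective: alternative decomposition.


-- ===== PORT A =====
-- one iteration of A's for-loop: state (clumpsize, clumpcount), values (a[i], a[i+1])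
def stepA (st : Int × Int) (x y : Int) : Int × Int :=
  let cs := if x == y then st.1 + 1 else st.1
  if x ≠ y ∧ cs > 1 then (1, st.2 + 1) else (cs, st.2)

def countClumps (a : List Int) : Int :=
  let s := (PySem.List.pyRange 0 (PySem.List.len a - 1) 1).foldl
    (fun st i => stepA st (PySem.List.pyGetD a i 0) (PySem.List.pyGetD a (i + 1) 0))
    (1, 0)
  if s.1 > 1 then s.2 + 1 else s.2

-- ===== PORT B =====
-- B's outer while: measure the maximal run at the front, count it if longer than 1, jump past it
def altGo : List Int → Int
  | [] => 0
  | x :: xs =>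
    (if ((xs.takeWhile (fun z => z == x)).length : Int) + 1 > 1 then 1 else 0)
      + altGo (xs.dropWhile (fun z => z == x))
termination_by l => l.length
decreasing_by
  exact Nat.lt_succ_of_le (List.length_dropWhile_le _ _)

def countClumps_alt (a : List Int) : Int := altGo a

-- ===== PRECONDITION & SPEC =====
def Spec_countClumps (a : List Int) (out : Int) : Prop := out = countClumps_alt a
instance (a : List Int) (out : Int) : Decidable (Spec_countClumps a out) := by unfold Spec_countClumps; infer_instance

-- ===== CLAIM (what is proved, stated in full; the proofs are below) =====
def Claim_equal_countClumps : Prop := ∀ (a : List Int), Dom_countClumps a → Spec_countClumps a (countClumps a)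

-- ===== LEMMAS AND PROOFS =====

-- A's loop, restated as structural recursion over adjacent pairs
def pairFold : List Int → Int × Int → Int × Int
  | [], st => st
  | [_], st => st
  | x :: y :: t, st => pairFold (y :: t) (stepA st x y)

theorem loopA_eq_pairFold (a : List Int) (st : Int × Int) :
    (PySem.List.pyRange 0 (PySem.List.len a - 1) 1).foldl
      (fun st i => stepA st (PySem.List.pyGetD a i 0) (PySem.List.pyGetD a (i + 1) 0)) st
    = pairFold a st := by
  induction a generalizing st with
  | nil => simp [PySem.List.pyRange, pairFold]
  | cons x xs ih =>
    cases xs with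
    | nil => simp [pairFold, PySem.List.pyRange_one_eq_nil]
    | cons y t =>
      have h1 : PySem.List.len (x :: y :: t) - 1 = ((t.length + 1 : ℕ) : ℤ) := by
        simp only [PySem.List.len_eq, List.length_cons]; push_cast; ring
      have h2 : PySem.List.len (y :: t) - 1 = ((t.length : ℕ) : ℤ) := by
        simp only [PySem.List.len_eq, List.length_cons]; push_cast; ring
      show _ = pairFold (y :: t) (stepA st x y)
      rw [← ih (stepA st x y), h1, h2, PySem.List.pyRange_zero_natCast,
          PySem.List.pyRange_zero_natCast, List.range_succ_eq_map,
          List.map_cons, List.foldl_cons, List.map_map, List.foldl_map, List.foldl_map]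
      have hxy : stepA st (PySem.List.pyGetD (x :: y :: t) ((0 : ℕ) : ℤ) 0)
          (PySem.List.pyGetD (x :: y :: t) (((0 : ℕ) : ℤ) + 1) 0) = stepA st x y := by
        norm_num [PySem.List.pyGetD_natCast]
        rw [show ((1 : ℤ)) = ((1 : ℕ) : ℤ) by norm_num, PySem.List.pyGetD_natCast]
        rfl
      rw [hxy]
      refine PySem.List.foldl_congr_mem _ _ _ _ ?_
      intro acc k _
      have e1 : ((Nat.succ k : ℕ) : ℤ) = ((k + 1 : ℕ) : ℤ) := by push_cast; ring
      have e2 : ((Nat.succ k : ℕ) : ℤ) + 1 = ((k + 2 : ℕ) : ℤ) := by push_cast; ring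
      have e3 : ((k : ℕ) : ℤ) + 1 = ((k + 1 : ℕ) : ℤ) := by push_cast; ring
      simp only [Function.comp, e1, e2, e3, PySem.List.pyGetD_natCast,
        List.getD_cons_succ]

-- stepA is additive in the clumpcount component
theorem stepA_add (cs cc x y : Int) :
    stepA (cs, cc) x y = ((stepA (cs, 0) x y).1, (stepA (cs, 0) x y).2 + cc) := by
  simp only [stepA]
  split_ifs <;> simp [add_comm]

-- so is the whole pair loop
theorem pairFold_add (l : List Int) (cs cc : Int) :
    pairFold l (cs, cc) = ((pairFold l (cs, 0)).1, (pairFold l (cs, 0)).2 + cc) := by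
  induction l generalizing cs cc with
  | nil => simp [pairFold]
  | cons x xs ih =>
    cases xs with
    | nil => simp [pairFold]
    | cons y t =>
      simp only [pairFold]
      rw [stepA_add, ih, ih ((stepA (cs, 0) x y).1) ((stepA (cs, 0) x y).2)]
      simp [add_assoc]

-- consuming the whole list when it is one run of x
theorem pairFold_run_nil (run : List Int) (x : Int)
    (hrun : ∀ z ∈ run, z = x) (cs cc : Int) :
    pairFold (x :: run) (cs, cc) = (cs + run.length, cc) := by
  induction run generalizing cs with
  | nil => simp [pairFold]
  | cons z zs ih =>
    have hz : z = x := hrun z (by simp)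
    subst hz
    have h1 : ∀ w ∈ zs, w = z := fun w hw => hrun w (by simp [hw])
    have step1 : pairFold (z :: z :: zs) (cs, cc) = pairFold (z :: zs) (cs + 1, cc) := by
      simp [pairFold, stepA]
    rw [step1, ih h1 (cs + 1)]
    simp only [List.length_cons]
    push_cast
    ring_nf

-- consuming the maximal run of x at the head, with a different element following
theorem pairFold_run_cons (run : List Int) (x y : Int) (t : List Int)
    (hrun : ∀ z ∈ run, z = x) (hy : ¬ y = x) (cs cc : Int) :
    pairFold (x :: (run ++ y :: t)) (cs, cc)
    = pairFold (y :: t)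
        (if cs + run.length > 1 then (1, cc + 1) else (cs + run.length, cc)) := by
  induction run generalizing cs with
  | nil =>
    have hxy : ¬ x = y := fun h => hy h.symm
    simp only [List.nil_append, pairFold, stepA, List.length_nil, Nat.cast_zero, add_zero]
    by_cases hcs : cs > 1 <;> simp [hxy, hcs]
  | cons z zs ih =>
    have hz : z = x := hrun z (by simp)
    subst hz
    have h1 : ∀ w ∈ zs, w = z := fun w hw => hrun w (by simp [hw])
    have step1 : pairFold (z :: (z :: zs ++ y :: t)) (cs, cc)
        = pairFold (z :: (zs ++ y :: t)) (cs + 1, cc) := by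
      simp [pairFold, stepA]
    rw [step1, ih h1 (cs + 1)]
    have harr : cs + 1 + (zs.length : ℤ) = cs + ((zs.length + 1 : ℕ) : ℤ) := by
      push_cast; ring
    simp only [List.length_cons]
    rw [harr]

-- head of a dropWhile fails the predicate
theorem head?_dropWhile_false (p : Int → Bool) (l : List Int) (y : Int)
    (h : (l.dropWhile p).head? = some y) : p y = false := by
  induction l with
  | nil => simp [List.dropWhile] at h
  | cons a l ih =>
    rw [List.dropWhile_cons] at h
    by_cases hp : p a = true
    · exact ih (by simpa [hp] using h)
    · rw [if_neg hp] at h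
      simp only [List.head?_cons, Option.some.injEq] at h
      subst h
      simpa using hp

theorem main_bounded : ∀ (n : ℕ) (a : List Int), a.length ≤ n →
    (if (pairFold a (1, 0)).1 > 1 then (pairFold a (1, 0)).2 + 1
     else (pairFold a (1, 0)).2) = altGo a := by
  intro n
  induction n with
  | zero =>
    intro a ha
    have : a = [] := List.eq_nil_of_length_eq_zero (Nat.le_zero.mp ha)
    subst this
    simp [pairFold, altGo]
  | succ n ih =>
    intro a ha
    cases a with
    | nil => simp [pairFold, altGo]
    | cons x xs =>
      have hrun : ∀ z ∈ xs.takeWhile (fun z => z == x), z = x :=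
        fun z hz => eq_of_beq (List.mem_takeWhile_imp (p := fun z => z == x) hz)
      have hrest : ∀ y ∈ (xs.dropWhile (fun z => z == x)).head?, ¬ y = x := by
        intro y hy heq
        have := head?_dropWhile_false (fun z => z == x) xs y hy
        simp [heq] at this
      have hlen : (xs.dropWhile (fun z => z == x)).length ≤ xs.length :=
        List.length_dropWhile_le _ _
      obtain ⟨L, hL⟩ : ∃ L, xs.takeWhile (fun z => z == x) = L := ⟨_, rfl⟩
      cases hr : xs.dropWhile (fun z => z == x) with
      | nil =>
        have hxs : L = xs := by
          rw [← List.takeWhile_append_dropWhile (p := fun z => z == x) (l := xs), hL, hr,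
            List.append_nil]
        have hrunxs : ∀ z ∈ xs, z = x := by rw [← hxs]; exact hL ▸ hrun
        rw [pairFold_run_nil xs x hrunxs 1 0]
        have h0 : altGo (x :: xs) =
            (if ((xs.takeWhile (fun z => z == x)).length : ℤ) + 1 > 1 then 1 else 0)
              + altGo (xs.dropWhile (fun z => z == x)) := by
          rw [altGo]
        rw [h0, hL, hxs, hr]
        simp only [altGo, add_zero]
        split_ifs <;> omega
      | cons y t =>
        have hsplit : xs = L ++ y :: t := by
          rw [← List.takeWhile_append_dropWhile (p := fun z => z == x) (l := xs), hL, hr]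
        have hy : ¬ y = x := hrest y (by rw [hr]; simp)
        have hrunL : ∀ z ∈ L, z = x := hL ▸ hrun
        have hg : pairFold (x :: xs) (1, 0) = pairFold (x :: (L ++ y :: t)) (1, 0) := by
          rw [← hsplit]
        rw [hg, pairFold_run_cons L x y t hrunL hy 1 0]
        have haltcons : altGo (x :: xs) =
            (if ((L.length : ℤ)) + 1 > 1 then 1 else 0) + altGo (y :: t) := by
          rw [altGo, hL, hr]
        have hlr : (y :: t).length ≤ n := by
          have h' : (y :: t).length ≤ xs.length := hr ▸ hlen
          simp only [List.length_cons] at ha h' ⊢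
          omega
        have hstate : (if (1 : ℤ) + (L.length : ℤ) > 1 then ((1 : ℤ), (0 : ℤ) + 1)
              else (1 + (L.length : ℤ), 0))
            = (1, if (L.length : ℤ) + 1 > 1 then 1 else 0) := by
          by_cases hLl : (L.length : ℤ) + 1 > 1
          · rw [if_pos (by omega), if_pos hLl]; norm_num
          · rw [if_neg (by omega), if_neg hLl]
            have h0 : (L.length : ℤ) = 0 := by
              have := Int.natCast_nonneg L.length
              omega
            rw [h0]; norm_num
        rw [hstate, pairFold_add (y :: t) 1 _, haltcons, ← ih (y :: t) hlr]
        split_ifs <;> omega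

theorem main_eq (a : List Int) : countClumps a = countClumps_alt a := by
  unfold countClumps countClumps_alt
  rw [loopA_eq_pairFold]
  exact main_bounded a.length a le_rfl

-- ===== VERDICT (by name: the statement is the Claim_ definition above) =====
theorem countClumps_spec : Claim_equal_countClumps := by
  intro a _
  unfold Spec_countClumps
  exact main_eq a
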